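-- pv_equiv track=rewrite | github.com/Azim-Islam/Problem-Solving-DSA | WarmUP/val.py | s2
-- ===== SOURCE A (Python) =====
-- def s2(n, arr):
--     for i in range(n*n+1):
--         arr.sort()
--         while arr[0] < arr[-1]:
--             arr[0] += 1
--             arr[-1] -= 1
--
--     arr.sort()
--     return arr[-1]-arr[0]
-- ===== SOURCE B (Python) =====
-- def s2(n, arr):
--     for _ in range(n * n + 1):
--         arr.sort()
--         a, b = arr[0], arr[-1]
--         if b - a <= 1:
--             break
--         arr[0] = (a + b + 1) // 2
--         arr[-1] = (a + b) // 2
--     arr.sort()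
--     return arr[-1] - arr[0]
-- ===== Notes on version B (the rewrite author's own statement) =====
-- stated objective: faster
-- what changed: B replaces A's unit-by-unit transfer inner while-loop with a closed-form ceiling/floor average of the current min and max, and stops the outer loop early once max-min <= 1 (further rounds only permute the multiset), removing the O(value-range) inner loop and almost all of the n^2 rounds.
import Mathlib
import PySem

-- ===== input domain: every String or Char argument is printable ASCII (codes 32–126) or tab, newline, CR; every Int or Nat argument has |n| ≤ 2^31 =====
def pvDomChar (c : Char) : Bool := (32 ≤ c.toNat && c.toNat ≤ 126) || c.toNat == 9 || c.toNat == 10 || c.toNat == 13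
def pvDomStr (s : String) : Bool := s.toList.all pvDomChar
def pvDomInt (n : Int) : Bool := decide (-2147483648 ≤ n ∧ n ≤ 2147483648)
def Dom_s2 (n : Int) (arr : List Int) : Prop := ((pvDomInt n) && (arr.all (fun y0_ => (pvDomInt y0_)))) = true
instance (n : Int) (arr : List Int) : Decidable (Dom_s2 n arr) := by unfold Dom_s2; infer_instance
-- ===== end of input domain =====

-- B replaces A's unit-by-unit min/max transfer loop with a closed-form ceiling/floor
-- average and stops the outer loop early once max-min <= 1 (objective: faster).
-- Both A and B mutate `arr` in place (sort/assignments); the equivalence proved here is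
-- about the RETURN value only (the final list contents may differ between A and B).

-- ===== PORT A =====
-- Python sort: PySem stable sort with identity key
def pysort (l : List Int) : List Int := PySem.List.sorted l (fun x => x) false

-- the inner `while arr[0] < arr[-1]: arr[0] += 1; arr[-1] -= 1` on the two values
def pyEq2 (a b : Int) : Int × Int :=
  if a < b then pyEq2 (a + 1) (b - 1) else (a, b)
termination_by (b - a).toNat
decreasing_by omega

-- one body of A's outer for-loop: arr.sort(); while-loop on arr[0], arr[-1]
def stepA (arr : List Int) : List Int :=
  match pysort arr with
  | [] => []            -- Python raises IndexError at arr[0]; excluded by Pre_s2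
  | [x] => [x]          -- arr[0] and arr[-1] are the same element: x < x never holds
  | a :: y :: t =>
      let b := (y :: t).getLast (List.cons_ne_nil y t)
      let p := pyEq2 a b
      p.1 :: ((y :: t).dropLast ++ [p.2])

def loopA : Nat → List Int → List Int
  | 0, arr => arr
  | k + 1, arr => loopA k (stepA arr)

def s2 (n : Int) (arr : List Int) : Int :=
  match pysort (loopA (n * n + 1).toNat arr) with
  | [] => 0             -- Python raises IndexError here (arr = []); excluded by Pre_s2
  | x :: xs => (x :: xs).getLast (List.cons_ne_nil x xs) - x

-- ===== PORT B =====
def loopB : Nat → List Int → List Int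
  | 0, arr => arr
  | k + 1, arr =>
      match pysort arr with
      | [] => []        -- Python raises IndexError at arr[0]; excluded by Pre_s2
      | [x] => [x]      -- b - a = 0 ≤ 1: break
      | a :: y :: t =>
          let b := (y :: t).getLast (List.cons_ne_nil y t)
          if b - a ≤ 1 then a :: y :: t   -- break
          else loopB k (PySem.Int.floordiv (a + b + 1) 2 ::
                        ((y :: t).dropLast ++ [PySem.Int.floordiv (a + b) 2]))

def s2_alt (n : Int) (arr : List Int) : Int :=
  match pysort (loopB (n * n + 1).toNat arr) with
  | [] => 0             -- Python raises IndexError here (arr = []); excluded by Pre_s2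
  | x :: xs => (x :: xs).getLast (List.cons_ne_nil x xs) - x

-- ===== PRECONDITION & SPEC =====
-- Python A raises IndexError (arr[0] on the empty list) iff arr = []; nothing else is excluded.
def Pre_s2 (n : Int) (arr : List Int) : Prop := arr ≠ []
instance (n : Int) (arr : List Int) : Decidable (Pre_s2 n arr) := by unfold Pre_s2; infer_instance

def pvWitness_s2 : Int × List Int := (3, [5, 1, 4])

def Spec_s2 (n : Int) (arr : List Int) (out : Int) : Prop := out = s2_alt n arr
instance (n : Int) (arr : List Int) (out : Int) : Decidable (Spec_s2 n arr out) := by unfold Spec_s2; infer_instance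

-- ===== CLAIM (what is proved, stated in full; the proofs are below) =====
def Claim_equal_s2 : Prop := ∀ (n : Int) (arr : List Int), Dom_s2 n arr → Pre_s2 n arr → Spec_s2 n arr (s2 n arr)

-- ===== LEMMAS AND PROOFS =====

-- closed form of the inner while-loop
theorem pyEq2_ediv : ∀ (k : Nat) (a b : Int), (b - a).toNat ≤ k →
    pyEq2 a b = if a < b then ((a + b + 1) / 2, (a + b) / 2) else (a, b) := by
  intro k
  induction k with
  | zero =>
      intro a b h
      have hab : ¬ a < b := by omega
      rw [pyEq2]; simp [hab]
  | succ k ih =>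
      intro a b h
      rw [pyEq2]
      by_cases hab : a < b
      · simp only [if_pos hab]
        rw [ih (a + 1) (b - 1) (by omega)]
        by_cases h2 : a + 1 < b - 1
        · simp only [if_pos h2, Prod.mk.injEq]
          constructor <;> omega
        · simp only [if_neg h2, Prod.mk.injEq]
          have h3 : b = a + 1 ∨ b = a + 2 := by omega
          rcases h3 with h3 | h3 <;> subst h3 <;> constructor <;> omega
      · simp [hab]

theorem pyEq2_spec (a b : Int) :
    pyEq2 a b = if a < b then
      (PySem.Int.floordiv (a + b + 1) 2, PySem.Int.floordiv (a + b) 2) else (a, b) := by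
  rw [PySem.Int.floordiv_eq_ediv_of_pos (by omega : (0:Int) < 2) (a := a + b + 1),
      PySem.Int.floordiv_eq_ediv_of_pos (by omega : (0:Int) < 2) (a := a + b)]
  exact pyEq2_ediv (b - a).toNat a b le_rfl

theorem pysort_perm (l : List Int) : (pysort l).Perm l := PySem.List.sorted_perm l _ _

theorem pysort_pairwise (l : List Int) : (pysort l).Pairwise (· ≤ ·) :=
  PySem.List.sorted_pairwise l _

theorem pysort_eq_of_perm {l₁ l₂ : List Int} (h : l₁.Perm l₂) : pysort l₁ = pysort l₂ :=
  PySem.List.sorted_eq_sorted_of_perm l₁ l₂ _ (fun _ _ h => h) h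

theorem pysort_idem (l : List Int) : pysort (pysort l) = pysort l :=
  PySem.List.sorted_sorted l _

theorem pysort_singleton (x : Int) : pysort [x] = [x] :=
  List.perm_singleton.mp (pysort_perm [x])

theorem perm_of_pysort_eq {l₁ l₂ : List Int} (h : pysort l₁ = pysort l₂) : l₁.Perm l₂ :=
  (PySem.List.sorted_id_eq_sorted_id_iff_perm l₁ l₂).mp h

-- every member of a ≤-pairwise list is ≤ its last element
theorem le_getLast_of_pairwise : ∀ (l : List Int) (h : l ≠ []),
    l.Pairwise (· ≤ ·) → ∀ x ∈ l, x ≤ l.getLast h := by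
  intro l
  induction l with
  | nil => intro h; exact absurd rfl h
  | cons a t ih =>
      intro _ hp x hx
      rcases List.pairwise_cons.mp hp with ⟨ha, ht⟩
      cases t with
      | nil => simp at hx; simp [hx]
      | cons y s =>
          rw [List.getLast_cons (List.cons_ne_nil y s)]
          rcases List.mem_cons.mp hx with h1 | h1
          · subst h1; exact ha _ (List.getLast_mem _)
          · exact ih (List.cons_ne_nil y s) ht x h1

-- "max - min ≤ 1" as a symmetric condition on members
def Flat (arr : List Int) : Prop := ∀ x ∈ arr, ∀ y ∈ arr, x ≤ y + 1

theorem flat_of_spread {arr : List Int} {a y : Int} {t : List Int}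
    (hs : pysort arr = a :: y :: t)
    (hb : (y :: t).getLast (List.cons_ne_nil y t) - a ≤ 1) : Flat arr := by
  intro x hx z hz
  have hp : (a :: y :: t).Pairwise (· ≤ ·) := by
    have := pysort_pairwise arr; rwa [hs] at this
  have hxs : x ∈ a :: y :: t := by
    have := (pysort_perm arr).mem_iff.mpr hx; rwa [hs] at this
  have hle : a ≤ z := PySem.List.key_head_sorted_le arr (fun x => x) hs z hz
  have hup := le_getLast_of_pairwise (a :: y :: t) (List.cons_ne_nil a (y :: t)) hp x hxs
  rw [List.getLast_cons (List.cons_ne_nil y t)] at hup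
  omega

theorem flat_perm {l₁ l₂ : List Int} (h : l₁.Perm l₂) (hf : Flat l₂) : Flat l₁ := by
  intro x hx y hy
  exact hf x (h.mem_iff.mp hx) y (h.mem_iff.mp hy)

theorem perm_swap_ends (d : List Int) (a b : Int) :
    (b :: (d ++ [a])).Perm (a :: (d ++ [b])) := by
  have h2 : ((b :: d) ++ [a]).Perm ([a] ++ (b :: d)) := List.perm_append_comm
  have h3 : (a :: ([b] ++ d)).Perm (a :: (d ++ [b])) := List.Perm.cons a List.perm_append_comm
  exact h2.trans h3

-- on a Flat list, one round of A only permutes the elements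
theorem stepA_flat {arr : List Int} (hf : Flat arr) : pysort (stepA arr) = pysort arr := by
  unfold stepA
  rcases hs : pysort arr with _ | ⟨a, _ | ⟨y, t⟩⟩
  · exact pysort_eq_of_perm (pysort_perm [])
  · exact pysort_singleton a
  · dsimp only
    have hend : pysort (a :: y :: t) = a :: y :: t := by
      conv_lhs => rw [← hs]
      rw [pysort_idem, hs]
    have hre : (y :: t).dropLast ++ [(y :: t).getLast (List.cons_ne_nil y t)] = y :: t :=
      List.dropLast_append_getLast _
    set b := (y :: t).getLast (List.cons_ne_nil y t) with hbdef
    have hb_mem : b ∈ (y :: t) := List.getLast_mem _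
    have hp : (a :: y :: t).Pairwise (· ≤ ·) := by
      have := pysort_pairwise arr; rwa [hs] at this
    have hab : a ≤ b := (List.pairwise_cons.mp hp).1 b hb_mem
    have hba : b ≤ a + 1 := by
      have hbarr : b ∈ arr := (pysort_perm arr).mem_iff.mp (by rw [hs]; exact List.mem_cons_of_mem a hb_mem)
      have haarr : a ∈ arr := (pysort_perm arr).mem_iff.mp (by rw [hs]; exact List.mem_cons_self)
      exact hf b hbarr a haarr
    by_cases hlt : a < b
    · -- b = a + 1 : the round swaps the two ends
      have hpq : pyEq2 a b = (b, a) := by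
        rw [pyEq2_spec, if_pos hlt,
            PySem.Int.floordiv_eq_ediv_of_pos (by omega : (0:Int) < 2) (a := a + b + 1),
            PySem.Int.floordiv_eq_ediv_of_pos (by omega : (0:Int) < 2) (a := a + b)]
        simp only [Prod.mk.injEq]
        constructor <;> omega
      rw [hpq]
      have hperm : (b :: ((y :: t).dropLast ++ [a])).Perm (a :: y :: t) := by
        have h1 := perm_swap_ends (y :: t).dropLast a b
        rwa [hre] at h1
      rw [pysort_eq_of_perm hperm, hend]
    · -- b = a : the round writes back exactly the sorted list
      have hpq : pyEq2 a b = (a, b) := by rw [pyEq2_spec, if_neg hlt]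
      rw [hpq]
      dsimp only
      rw [hre, hend]

theorem loopA_flat : ∀ (k : Nat) (arr : List Int), Flat arr →
    pysort (loopA k arr) = pysort arr := by
  intro k
  induction k with
  | zero => intro arr _; rfl
  | succ k ih =>
      intro arr hf
      have hstep : pysort (stepA arr) = pysort arr := stepA_flat hf
      have hperm : (stepA arr).Perm arr := perm_of_pysort_eq hstep
      show pysort (loopA k (stepA arr)) = pysort arr
      rw [ih (stepA arr) (flat_perm hperm hf), hstep]

-- the sorted states of A's and B's loops coincide at every fuel
theorem loop_eq : ∀ (k : Nat) (arr : List Int),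
    pysort (loopA k arr) = pysort (loopB k arr) := by
  intro k
  induction k with
  | zero => intro arr; rfl
  | succ k ih =>
      intro arr
      show pysort (loopA k (stepA arr)) = pysort (loopB (k + 1) arr)
      rw [loopB]
      rcases hs : pysort arr with _ | ⟨a, _ | ⟨y, t⟩⟩
      · -- arr = []
        have harr : arr = [] := (PySem.List.sorted_eq_nil_iff arr _ _).mp hs
        subst harr
        have hstep : stepA ([] : List Int) = [] := rfl
        rw [hstep, loopA_flat k [] (by intro x hx; simp at hx)]
      · -- arr = [a]
        have harr : arr = [a] := by
          have h1 := pysort_perm arr; rw [hs] at h1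
          exact List.perm_singleton.mp h1.symm
        subst harr
        have hstep : stepA [a] = [a] := by unfold stepA; rw [hs]
        rw [hstep, loopA_flat k [a] (by intro x hx z hz; simp at hx hz; omega), hs]
      · dsimp only
        set b := (y :: t).getLast (List.cons_ne_nil y t) with hbdef
        by_cases hbr : b - a ≤ 1
        · -- B breaks; A keeps permuting a Flat list
          rw [if_pos hbr]
          have hflat : Flat arr := flat_of_spread hs hbr
          have hstep : pysort (stepA arr) = pysort arr := stepA_flat hflat
          have hperm : (stepA arr).Perm arr := perm_of_pysort_eq hstep
          rw [loopA_flat k (stepA arr) (flat_perm hperm hflat), hstep, ← hs, pysort_idem]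
        · -- both take one identical averaging round
          rw [if_neg hbr]
          have hlt : a < b := by
            have hp : (a :: y :: t).Pairwise (· ≤ ·) := by
              have := pysort_pairwise arr; rwa [hs] at this
            have := (List.pairwise_cons.mp hp).1 b (List.getLast_mem _)
            omega
          have hstep : stepA arr =
              PySem.Int.floordiv (a + b + 1) 2 ::
                ((y :: t).dropLast ++ [PySem.Int.floordiv (a + b) 2]) := by
            unfold stepA
            rw [hs]
            dsimp only
            rw [pyEq2_spec, if_pos hlt]
          rw [hstep]
          exact ih _

-- ===== VERDICT (by name: the statement is the Claim_ definition above) =====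
theorem s2_spec : Claim_equal_s2 := by
  intro n arr _ _
  unfold Spec_s2 s2 s2_alt
  rw [loop_eq]
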